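-- pv_equiv track=rewrite | github.com/gallons29/PythonUNI | Esercitazione10-18/es6.py | maiuscolo_asterischi
-- ===== SOURCE A (Python) =====
-- def maiuscolo_asterischi(str):
--     maiuscolo = False
--     new_str = ""
--     for char in str:
--         if(char == '*'):
--             maiuscolo = not maiuscolo
--         elif not maiuscolo:
--             new_str += char
--         else:
--             new_str += char.upper()
--     return new_str
-- ===== SOURCE B (Python) =====
-- def maiuscolo_asterischi(str):
--     parts = str.split('*')
--     return ''.join(seg.upper() if i % 2 else seg for i, seg in enumerate(parts))
-- ===== Notes on version B (the rewrite author's own statement) =====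
-- stated objective: simpler
-- what changed: Replaces the character-by-character loop with a toggled flag by split('*') followed by a join that uppercases the odd-indexed segments.
import Mathlib
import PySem

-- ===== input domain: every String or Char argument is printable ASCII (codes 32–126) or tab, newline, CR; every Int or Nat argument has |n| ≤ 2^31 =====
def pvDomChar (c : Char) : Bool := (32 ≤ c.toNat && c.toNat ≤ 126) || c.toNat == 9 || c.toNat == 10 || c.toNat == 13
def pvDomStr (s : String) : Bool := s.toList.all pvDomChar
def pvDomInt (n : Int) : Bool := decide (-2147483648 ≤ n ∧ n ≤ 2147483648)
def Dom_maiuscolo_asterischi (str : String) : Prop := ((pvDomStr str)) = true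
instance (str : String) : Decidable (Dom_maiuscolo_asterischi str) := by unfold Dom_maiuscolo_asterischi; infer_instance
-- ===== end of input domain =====

-- B replaces A's character-by-character toggle loop by split('*') + join with odd-indexed segments uppercased (simpler decomposition).


-- ===== PORT A =====
-- literal port of A: a foldl over the characters carrying (maiuscolo, new_str)
def stepA (st : Bool × List Char) (char : Char) : Bool × List Char :=
  if char = '*' then (!st.1, st.2)
  else if !st.1 then (st.1, st.2 ++ [char])
  else (st.1, st.2 ++ [PySem.Chars.upperChar char])

def maiuscolo_asterischi (str : String) : String :=
  String.ofList (str.toList.foldl stepA (false, [])).2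

-- ===== PORT B =====
-- literal port of B: split on '*', uppercase odd-indexed segments, join
def maiuscolo_asterischi_alt (str : String) : String :=
  let parts := (PySem.Str.split? str "*").getD []
  PySem.Str.join "" ((PySem.List.enumerate parts).map
    (fun p => if p.1 % 2 ≠ 0 then PySem.Str.upper p.2 else p.2))

-- ===== PRECONDITION & SPEC =====
def Spec_maiuscolo_asterischi (str : String) (out : String) : Prop := out = maiuscolo_asterischi_alt str
instance (str : String) (out : String) : Decidable (Spec_maiuscolo_asterischi str out) := by unfold Spec_maiuscolo_asterischi; infer_instance

-- ===== CLAIM (what is proved, stated in full; the proofs are below) =====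
def Claim_equal_maiuscolo_asterischi : Prop := ∀ (str : String), Dom_maiuscolo_asterischi str → Spec_maiuscolo_asterischi str (maiuscolo_asterischi str)

-- ===== LEMMAS AND PROOFS =====

-- A's loop as a pure recursion
def goA : Bool → List Char → List Char
  | _, [] => []
  | b, c :: cs =>
    if c = '*' then goA (!b) cs
    else (if b then PySem.Chars.upperChar c else c) :: goA b cs

-- simple recursive characterisation of split on '*'
def splitStar : List Char → List (List Char)
  | [] => [[]]
  | c :: rest =>
    if c = '*' then [] :: splitStar rest
    else List.modifyHead (fun p => c :: p) (splitStar rest)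

-- join with alternating uppercasing
def bjoin : Bool → List (List Char) → List Char
  | _, [] => []
  | b, p :: ps => (if b then PySem.Chars.upper p else p) ++ bjoin (!b) ps

lemma splitStar_ne_nil (cs : List Char) : splitStar cs ≠ [] := by
  induction cs with
  | nil => simp [splitStar]
  | cons c rest ih =>
    simp only [splitStar]
    split_ifs
    · simp
    · cases h : splitStar rest with
      | nil => exact absurd h ih
      | cons p ps => simp [List.modifyHead]

lemma foldlA_spec (cs : List Char) (b : Bool) (acc : List Char) :
    (cs.foldl stepA (b, acc)).2 = acc ++ goA b cs := by
  induction cs generalizing b acc with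
  | nil => simp [goA]
  | cons c cs ih =>
    rw [List.foldl_cons]
    by_cases h1 : c = '*'
    · rw [show stepA (b, acc) c = (!b, acc) by simp [stepA, h1]]
      rw [ih]; simp [goA, h1]
    · cases b
      · rw [show stepA (false, acc) c = (false, acc ++ [c]) by simp [stepA, h1]]
        rw [ih]; simp [goA, h1]
      · rw [show stepA (true, acc) c = (true, acc ++ [PySem.Chars.upperChar c]) by
          simp [stepA, h1]]
        rw [ih]; simp [goA, h1]

lemma modifyHead_id_fun (xs : List (List Char)) :
    List.modifyHead (fun p : List Char => p) xs = xs := by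
  cases xs <;> simp

lemma splitOn_go_spec (fuel : Nat) (l cur : List Char) (acc : List (List Char))
    (h : l.length < fuel) :
    PySem.Chars.splitOn.go ['*'] fuel l cur acc =
      acc.reverse ++ List.modifyHead (fun p => cur.reverse ++ p) (splitStar l) := by
  induction l generalizing fuel cur acc with
  | nil =>
    cases fuel with
    | zero => omega
    | succ f => simp [PySem.Chars.splitOn.go, splitStar]
  | cons c rest ih =>
    cases fuel with
    | zero => omega
    | succ f =>
      rw [PySem.Chars.splitOn.go.eq_def]
      simp only [List.length_cons] at h
      by_cases hc : c = '*'
      · subst hc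
        have hpre : List.isPrefixOf ['*'] ('*' :: rest) = true := by
          simp [List.isPrefixOf]
        simp only [hpre, if_pos, List.length_singleton, List.drop_one, List.tail_cons]
        rw [ih f [] ((cur.reverse) :: acc) (by omega)]
        simp [splitStar, modifyHead_id_fun]
      · have hpre : List.isPrefixOf ['*'] (c :: rest) = false := by
          simp [List.isPrefixOf]
          exact fun h => absurd h.symm hc
        simp only [hpre, Bool.false_eq_true, if_false]
        rw [ih f (c :: cur) acc (by omega)]
        simp only [splitStar, hc, if_false]
        obtain ⟨p, ps, hps⟩ : ∃ p ps, splitStar rest = p :: ps := by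
          cases h : splitStar rest with
          | nil => exact absurd h (splitStar_ne_nil rest)
          | cons p ps => exact ⟨p, ps, rfl⟩
        simp [hps, List.modifyHead]

lemma splitOn_eq_splitStar (cs : List Char) :
    PySem.Chars.splitOn cs ['*'] = splitStar cs := by
  show PySem.Chars.splitOn.go ['*'] (cs.length + 1) cs [] [] = _
  rw [splitOn_go_spec (cs.length + 1) cs [] [] (by omega)]
  simp [modifyHead_id_fun]

lemma goA_eq_bjoin (cs : List Char) (b : Bool) :
    goA b cs = bjoin b (splitStar cs) := by
  induction cs generalizing b with
  | nil => simp [goA, splitStar, bjoin, PySem.Chars.upper]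
  | cons c rest ih =>
    by_cases hc : c = '*'
    · subst hc
      simp [goA, splitStar, bjoin, ih, PySem.Chars.upper]
    · obtain ⟨p, ps, hps⟩ : ∃ p ps, splitStar rest = p :: ps := by
        cases h : splitStar rest with
        | nil => exact absurd h (splitStar_ne_nil rest)
        | cons p ps => exact ⟨p, ps, rfl⟩
      simp only [goA, splitStar, hc, if_false, ih, hps, List.modifyHead, bjoin]
      cases b <;> simp [PySem.Chars.upper]

lemma enum_join_spec (ps : List String) (n : Int) (hn : 0 ≤ n) :
    (PySem.Str.join "" ((PySem.List.enumerate ps n).map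
      (fun p => if p.1 % 2 ≠ 0 then PySem.Str.upper p.2 else p.2))).toList =
      bjoin (decide (n % 2 ≠ 0)) (ps.map String.toList) := by
  induction ps generalizing n with
  | nil => simp [PySem.List.enumerate, PySem.Str.toList_join, PySem.Chars.join, bjoin,
      List.intercalate]
  | cons p ps ih =>
    have hsucc : (PySem.Str.join "" ((PySem.List.enumerate ps (n+1)).map
        (fun p => if p.1 % 2 ≠ 0 then PySem.Str.upper p.2 else p.2))).toList =
        bjoin (decide ((n+1) % 2 ≠ 0)) (ps.map String.toList) := ih (n+1) (by omega)
    have hpar : (decide ((n+1) % 2 ≠ 0)) = !(decide (n % 2 ≠ 0)) := by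
      rcases Int.emod_two_eq n with h | h <;> simp [h] <;> omega
    simp only [PySem.List.enumerate, List.map_cons, PySem.Str.toList_join] at *
    simp only [PySem.Chars.join, List.intercalate] at *
    cases hps : ps with
    | nil =>
      subst hps
      simp only [PySem.List.enumerate, List.map_nil] at *
      by_cases hodd : n % 2 ≠ 0 <;>
        simp [hodd, bjoin, PySem.Str.toList_upper, PySem.Chars.upper]
    | cons q qs =>
      -- reduce the (p :: rest) intercalate with empty separator to append
      subst hps
      by_cases hodd : n % 2 ≠ 0 <;>
        simp_all [bjoin, PySem.Str.toList_upper, PySem.Chars.upper]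

lemma alt_toList (str : String) :
    (maiuscolo_asterischi_alt str).toList = bjoin false (splitStar str.toList) := by
  have hsplit : ((PySem.Str.split? str "*").getD []).map String.toList =
      splitStar str.toList := by
    have h := PySem.Str.split?_map str "*"
    have hstar : ("*" : String).toList = ['*'] := rfl
    rw [hstar] at h
    simp only [PySem.Chars.split?, List.isEmpty_cons, Bool.false_eq_true, if_false,
      splitOn_eq_splitStar] at h
    cases hs : PySem.Str.split? str "*" with
    | none => rw [hs] at h; simp at h
    | some parts =>
      rw [hs] at h
      simp only [Option.map_some, Option.some.injEq] at h
      simpa [hs] using h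
  rw [maiuscolo_asterischi_alt]
  rw [enum_join_spec _ 0 (by omega)]
  simp [hsplit]

-- ===== VERDICT (by name: the statement is the Claim_ definition above) =====
theorem maiuscolo_asterischi_spec : Claim_equal_maiuscolo_asterischi := by
  intro str _
  unfold Spec_maiuscolo_asterischi
  have hA : maiuscolo_asterischi str = String.ofList (goA false str.toList) := by
    rw [maiuscolo_asterischi, foldlA_spec]; simp
  have hB : (maiuscolo_asterischi_alt str).toList = goA false str.toList := by
    rw [alt_toList, goA_eq_bjoin]
  rw [hA, ← hB, String.ofList_toList]
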